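-- pv_equiv track=rewrite | github.com/liupengsay/Algorithm | src/dp/linear_dp/problem.py | lc_2597
-- ===== SOURCE A (Python) =====
-- from collections import defaultdict, Counter, deque
-- from typing import List
--
-- def lc_2597(nums: List[int], k: int) -> int:
--     """
--     url: https://leetcode.cn/problems/the-number-of-beautiful-subsets/
--     tag: liner_dp|hash
--     """
--     power = [1 << i for i in range(21)]
--
--     def check(tmp):
--         m = len(tmp)
--         dp = [1] * (m + 1)
--         dp[1] = power[tmp[0]] - 1 + dp[0]
--         for i in range(1, m):
--             dp[i + 1] = dp[i - 1] * (power[tmp[i]] - 1) + dp[i]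
--         return dp[-1]
--
--     cnt = Counter(nums)
--     ans = 1
--     for num in cnt:
--         if num - k not in cnt:
--             lst = []
--             while num in cnt:
--                 lst.append(cnt[num])
--                 num += k
--             ans *= check(lst)
--     return ans - 1
-- ===== SOURCE B (Python) =====
-- from collections import Counter
--
--
-- def lc_2597(nums, k):
--     # Group distinct values into buckets by residue mod k, sort each bucket in
--     # the direction of k, and run the weighted house-robber DP over each
--     # maximal run of values exactly k apart, streaming (take, skip) instead of
--     # building chain lists, a dp table and a power table.
--     if k == 0:
--         return 0
--     cnt = Counter(nums)
--     buckets = {}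
--     for v in cnt:
--         buckets.setdefault(v % k, []).append(v)
--     ans = 1
--     for vals in buckets.values():
--         vals.sort(reverse=k < 0)
--         take, skip = 0, 1
--         prev = None
--         for v in vals:
--             w = pow(2, cnt[v]) - 1
--             if prev is not None and v - prev == k:
--                 take, skip = skip * w, take + skip
--             else:
--                 ans *= take + skip
--                 take, skip = w, 1
--             prev = v
--         ans *= take + skip
--     return ans - 1
-- ===== Notes on version B (the rewrite author's own statement) =====
-- stated objective: alternative
-- what changed: Chains are discovered by bucketing distinct values into a dict keyed by residue mod k and sorting each bucket in the direction of k (maximal runs of values exactly k apart), instead of A's per-key backward membership test plus forward while-walk; the per-chain house-robber DP is streamed as a (take, skip) pair during the scan instead of materialising the chain list, a dp table and a 21-entry power table; k == 0 returns 0 up front.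
import Mathlib
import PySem

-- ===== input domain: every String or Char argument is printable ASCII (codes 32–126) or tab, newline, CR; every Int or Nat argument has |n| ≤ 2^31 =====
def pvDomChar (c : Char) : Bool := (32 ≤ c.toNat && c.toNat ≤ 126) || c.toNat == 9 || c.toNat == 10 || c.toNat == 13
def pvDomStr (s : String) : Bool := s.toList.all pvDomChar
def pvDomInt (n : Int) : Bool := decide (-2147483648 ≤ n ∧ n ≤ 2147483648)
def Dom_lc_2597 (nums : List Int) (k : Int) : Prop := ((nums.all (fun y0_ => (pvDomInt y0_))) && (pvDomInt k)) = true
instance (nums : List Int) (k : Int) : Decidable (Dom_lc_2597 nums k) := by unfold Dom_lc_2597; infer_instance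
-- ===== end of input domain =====

-- B regroups the chain discovery (residue buckets sorted in the direction of k) and streams the
-- house-robber DP as a (take, skip) pair; equal to A on Pre_ (A's 21-entry power table raises
-- IndexError when a value occurs more than 20 times and k ≠ 0 — excluded by Pre_).

-- ===== PORT A =====
def pvPower : List Int := (PySem.List.pyRange 0 21 1).map (fun i => (1 : Int) <<< i.toNat)

def pvCheck (tmp : List Int) : Int :=
  let m := tmp.length
  let dp0 := List.replicate (m + 1) (1 : Int)
  let dp1 := dp0.set 1 (PySem.List.pyGetD pvPower (PySem.List.pyGetD tmp 0 0) 0 - 1 + PySem.List.pyGetD dp0 0 0)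
  let dp2 := (PySem.List.pyRange 1 (m : Int) 1).foldl (fun dp i =>
      dp.set (i + 1).toNat
        (PySem.List.pyGetD dp (i - 1) 0 * (PySem.List.pyGetD pvPower (PySem.List.pyGetD tmp i 0) 0 - 1)
          + PySem.List.pyGetD dp i 0)) dp1
  PySem.List.pyGetD dp2 (-1) 0

-- the while-loop; fuel = number of distinct values + 1 is an upper bound on its trip count
def pvWalkA (cnt : PySem.Dict Int Int) (k : Int) : Nat → Int → List Int → List Int
  | 0, _, lst => lst
  | fuel + 1, num, lst =>
    if cnt.contains num then pvWalkA cnt k fuel (num + k) (lst ++ [cnt.getD num 0]) else lst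

def lc_2597 (nums : List Int) (k : Int) : Int :=
  let cnt := PySem.Dict.counter nums
  let ans := cnt.keys.foldl (fun ans num =>
    if cnt.contains (num - k) = false then
      ans * pvCheck (pvWalkA cnt k (cnt.keys.length + 1) num [])
    else ans) 1
  ans - 1

-- ===== PORT B =====
def pvStep (cnt : PySem.Dict Int Int) (k : Int) (s : Int × Int × Int × Option Int) (v : Int) :
    Int × Int × Int × Option Int :=
  match s with
  | (ans, take, skip, prev) =>
    let w := (2 : Int) ^ (cnt.getD v 0).toNat - 1
    if (match prev with | some p => v - p == k | none => false) then
      (ans, skip * w, take + skip, some v)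
    else
      (ans * (take + skip), w, 1, some v)

def lc_2597_alt (nums : List Int) (k : Int) : Int :=
  if k == 0 then 0 else
  let cnt := PySem.Dict.counter nums
  let buckets := cnt.keys.foldl (fun d v => d.modify (PySem.Int.mod v k) [] (· ++ [v]))
    (PySem.Dict.empty : PySem.Dict Int (List Int))
  let ans := buckets.values.foldl (fun ans vals =>
      let srt := PySem.List.sorted vals (fun x => x) (decide (k < 0))
      let s := srt.foldl (pvStep (PySem.Dict.counter nums) k) (ans, 0, 1, none)
      s.1 * (s.2.1 + s.2.2.1)) 1
  ans - 1

-- ===== PRECONDITION & SPEC =====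
-- Pre_ excludes k ≠ 0 with a value occurring more than 20 times: there A's 21-entry power table
-- raises IndexError (with k = 0 A starts no chain and returns 0, so those inputs stay inside).
def Pre_lc_2597 (nums : List Int) (k : Int) : Prop := k = 0 ∨ ∀ v ∈ nums, nums.count v ≤ 20
instance (nums : List Int) (k : Int) : Decidable (Pre_lc_2597 nums k) := by unfold Pre_lc_2597; infer_instance
def pvWitness_lc_2597 : List Int × Int := ([2, 4, 2, 5], 2)

def Spec_lc_2597 (nums : List Int) (k : Int) (out : Int) : Prop := out = lc_2597_alt nums k
instance (nums : List Int) (k : Int) (out : Int) : Decidable (Spec_lc_2597 nums k out) := by unfold Spec_lc_2597; infer_instance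

-- ===== CLAIM (what is proved, stated in full; the proofs are below) =====
def Claim_equal_lc_2597 : Prop := ∀ (nums : List Int) (k : Int), Dom_lc_2597 nums k → Pre_lc_2597 nums k → Spec_lc_2597 nums k (lc_2597 nums k)

-- ===== LEMMAS AND PROOFS =====

def pvDStep (p : Int × Int) (w : Int) : Int × Int := (p.2 * w, p.1 + p.2)
def pvT (t s : Int) (ws : List Int) : Int :=
  ((ws.foldl pvDStep (t, s)).1 + (ws.foldl pvDStep (t, s)).2)
def pvD (ws : List Int) : Int := pvT 0 1 ws
def pvP (ws : List Int) : Int × Int := ws.foldl pvDStep (0, 1)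
def pvWf (c : Int) : Int := PySem.List.pyGetD pvPower c 0 - 1

lemma pvD_eq (l : List Int) : pvD l = (pvP l).1 + (pvP l).2 := rfl

lemma pvP_snoc (l : List Int) (w : Int) : pvP (l ++ [w]) = ((pvP l).2 * w, (pvP l).1 + (pvP l).2) := by
  simp [pvP, List.foldl_append, pvDStep]

lemma pvP_snd (l : List Int) : (pvP l).2 = pvD l.dropLast := by
  induction l using List.reverseRecOn with
  | nil => rfl
  | append_singleton l w ih => rw [pvP_snoc]; simp [pvD_eq]

lemma pvD_snoc (l : List Int) (w : Int) : pvD (l ++ [w]) = pvD l.dropLast * w + pvD l := by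
  rw [pvD_eq, pvP_snoc]
  rw [pvD_eq l, ← pvP_snd l]

lemma pvD_singleton (w : Int) : pvD [w] = w + 1 := by
  simp [pvD, pvT, pvDStep]

lemma check_inv (tmp : List Int) (h : 0 < tmp.length) : ∀ i : Nat, 1 ≤ i → i ≤ tmp.length →
    (PySem.List.pyRange 1 (i : Int) 1).foldl (fun dp i =>
      dp.set (i + 1).toNat
        (PySem.List.pyGetD dp (i - 1) 0 * (PySem.List.pyGetD pvPower (PySem.List.pyGetD tmp i 0) 0 - 1)
          + PySem.List.pyGetD dp i 0))
      ((List.replicate (tmp.length + 1) (1 : Int)).set 1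
        (PySem.List.pyGetD pvPower (PySem.List.pyGetD tmp 0 0) 0 - 1
          + PySem.List.pyGetD (List.replicate (tmp.length + 1) (1 : Int)) 0 0))
    = (List.range (tmp.length + 1)).map (fun j => if j ≤ i then pvD ((tmp.map pvWf).take j) else 1) := by
  have h0 : PySem.List.pyGetD tmp 0 0 = tmp[0] := by
    rw [PySem.List.pyGetD_of_nonneg tmp 0 le_rfl]
    simp [List.getD_eq_getElem? _ 0, List.getElem?_eq_getElem h]
  have hr : PySem.List.pyGetD (List.replicate (tmp.length + 1) (1 : Int)) 0 0 = 1 := by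
    rw [PySem.List.pyGetD_of_nonneg _ _ le_rfl]
    simp
  have htake1 : (List.map pvWf tmp).take 1 = [pvWf tmp[0]] := by
    rw [show (1 : Nat) = 0 + 1 by rfl, List.take_succ]
    simp [List.getElem?_eq_getElem (by simpa using h : (0:Nat) < (List.map pvWf tmp).length)]
  intro i h1 h2
  induction i, h1 using Nat.le_induction with
  | base =>
    rw [show ((1 : Nat) : Int) = 1 by norm_num]
    rw [PySem.List.pyRange_one_eq_nil (by norm_num)]
    simp only [List.foldl_nil]
    apply List.ext_getElem
    · simp
    · intro j hj hj2
      simp only [List.length_set, List.length_replicate] at hj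
      rw [List.getElem_set]
      simp only [List.getElem_map, List.getElem_range]
      rcases j with _ | j
      · simp [pvD, pvT, pvDStep]
      · rcases j with _ | j
        · rw [if_pos rfl, if_pos (by omega : 0 + 1 ≤ 1), h0, hr]
          have : (0 : Nat) + 1 = 1 := rfl
          rw [this, htake1, pvD_singleton, pvWf]
        · rw [if_neg (by omega), if_neg (by omega)]
          simp
  | succ i hi ih =>
    have hi' : i ≤ tmp.length := by omega
    have hilt : i < tmp.length := by omega
    have hcast : ((i + 1 : Nat) : Int) = (i : Int) + 1 := by push_cast; ring
    rw [hcast, PySem.List.pyRange_one_succ_right (by exact_mod_cast hi), List.foldl_append]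
    rw [ih hi']
    simp only [List.foldl_cons, List.foldl_nil]
    have hread : ∀ (p : Nat), p ≤ i →
        PySem.List.pyGetD ((List.range (tmp.length + 1)).map (fun j => if j ≤ i then pvD ((tmp.map pvWf).take j) else 1)) ((p : Nat) : Int) 0
          = pvD ((tmp.map pvWf).take p) := by
      intro p hp
      rw [PySem.List.pyGetD_of_nonneg _ _ (by positivity)]
      rw [Int.toNat_natCast]
      rw [PySem.List.getD_map_range _ _ _ _ (by omega)]
      simp [hp]
    have h1 : ((i : Int) - 1) = ((i - 1 : Nat) : Int) := by omega
    have h2i : ((i : Int) + 1).toNat = i + 1 := by omega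
    have htmp : PySem.List.pyGetD tmp (i : Int) 0 = tmp[i] := by
      rw [PySem.List.pyGetD_of_nonneg _ _ (by positivity), Int.toNat_natCast]
      simp [List.getD_eq_getElem? _ 0, List.getElem?_eq_getElem hilt]
    rw [h1, hread (i-1) (by omega), h2i, hread i le_rfl, htmp]
    apply List.ext_getElem
    · simp
    · intro j hj hj2
      simp only [List.length_set, List.length_map, List.length_range] at hj
      rw [List.getElem_set]
      simp only [List.getElem_map, List.getElem_range]
      have hws : i < (tmp.map pvWf).length := by simpa using hilt
      have htake : (tmp.map pvWf).take (i + 1) = (tmp.map pvWf).take i ++ [(tmp.map pvWf)[i]] := by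
        rw [List.take_succ]
        simp [List.getElem?_eq_getElem hws]
      by_cases hj1 : j = i + 1
      · subst hj1
        rw [if_pos rfl, if_pos (by omega : i + 1 ≤ i + 1)]
        rw [htake, pvD_snoc, List.dropLast_take hws]
        rw [List.getElem_map, pvWf]
      · rw [if_neg (fun hh => hj1 hh.symm)]
        by_cases hj2 : j ≤ i
        · rw [if_pos hj2, if_pos (by omega : j ≤ i + 1)]
        · rw [if_neg hj2, if_neg (by omega : ¬ j ≤ i + 1)]

lemma check_eq (tmp : List Int) (h : tmp ≠ []) :
    pvCheck tmp = pvD (tmp.map pvWf) := by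
  have hlen : 0 < tmp.length := List.length_pos_of_ne_nil h
  show PySem.List.pyGetD _ (-1) 0 = _
  rw [check_inv tmp hlen tmp.length hlen le_rfl]
  have hne : ((List.range (tmp.length + 1)).map (fun j => if j ≤ tmp.length then pvD ((tmp.map pvWf).take j) else 1)) ≠ [] := by simp
  rw [PySem.List.pyGetD_neg_one _ _ hne, List.getLast_eq_getElem]
  simp only [List.length_map, List.length_range, Nat.add_sub_cancel, List.getElem_map, List.getElem_range]
  rw [if_pos le_rfl]
  congr 1
  have : (tmp.map pvWf).length = tmp.length := by simp
  rw [← this, List.take_length]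

def pvChain (K : List Int) (k : Int) : Nat → Int → List Int
  | 0, _ => []
  | fuel + 1, v => if v ∈ K then v :: pvChain K k fuel (v + k) else []

lemma pvChain_succ (K : List Int) (k : Int) (fuel : Nat) (v : Int) :
    pvChain K k (fuel + 1) v = if v ∈ K then v :: pvChain K k fuel (v + k) else [] := rfl

lemma chain_subset (K : List Int) (k : Int) : ∀ (fuel : Nat) (v : Int), pvChain K k fuel v ⊆ K := by
  intro fuel
  induction fuel with
  | zero => intro v; simp [pvChain]
  | succ f ih =>
    intro v u hu
    rw [pvChain] at hu
    split_ifs at hu with hv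
    · rw [List.mem_cons] at hu
      rcases hu with h | h
      · simpa [h] using hv
      · exact ih _ h
    · simp at hu

lemma chain_form (K : List Int) (k : Int) : ∀ (fuel : Nat) (v : Int),
    ∃ n : Nat, pvChain K k fuel v = (List.range n).map (fun i : Nat => v + (i : Int) * k) := by
  intro fuel
  induction fuel with
  | zero => intro v; exact ⟨0, by simp [pvChain]⟩
  | succ f ih =>
    intro v
    rw [pvChain_succ]
    split_ifs with hv
    · obtain ⟨n, hn⟩ := ih (v + k)
      refine ⟨n + 1, ?_⟩
      apply List.ext_getElem
      · simp [hn]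
      · intro j h1 h2
        simp only [List.length_cons, hn, List.length_map, List.length_range] at h1
        rcases j with _ | j
        · simp only [List.getElem_cons_zero, List.getElem_map, List.getElem_range]
          push_cast; ring
        · simp only [List.getElem_cons_succ, hn, List.getElem_map, List.getElem_range]
          push_cast; ring
    · exact ⟨0, by simp⟩

lemma chain_nodup (K : List Int) (k : Int) (hk : k ≠ 0) (fuel : Nat) (v : Int) :
    (pvChain K k fuel v).Nodup := by
  obtain ⟨n, hn⟩ := chain_form K k fuel v
  rw [hn]
  refine List.Nodup.map ?_ List.nodup_range
  intro a b hab
  simp only at hab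
  have h1 : (a : Int) * k = (b : Int) * k := by linarith
  exact_mod_cast mul_right_cancel₀ hk h1

lemma chain_not_mem (K : List Int) (k : Int) (hk : k ≠ 0) (fuel : Nat) (v : Int) :
    v ∉ pvChain K k fuel (v + k) := by
  obtain ⟨n, hn⟩ := chain_form K k fuel (v + k)
  rw [hn]
  intro hmem
  rw [List.mem_map] at hmem
  obtain ⟨i, _, hi⟩ := hmem
  have h1 : ((i : Int) + 1) * k = 0 := by linarith
  rcases mul_eq_zero.1 h1 with h | h
  · omega
  · exact hk h

lemma nodup_subset_length {l K : List Int} (h : l.Nodup) (hs : l ⊆ K) : l.length ≤ K.length := by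
  calc l.length = l.toFinset.card := (List.toFinset_card_of_nodup h).symm
  _ ≤ K.toFinset.card := Finset.card_le_card (fun x hx => List.mem_toFinset.2 (hs (List.mem_toFinset.1 hx)))
  _ ≤ K.length := List.toFinset_card_le K

lemma chain_succ_eq_of_lt (K : List Int) (k : Int) :
    ∀ (fuel : Nat) (v : Int), (pvChain K k fuel v).length < fuel →
      pvChain K k (fuel + 1) v = pvChain K k fuel v := by
  intro fuel
  induction fuel with
  | zero => intro v h; simp at h
  | succ f ih =>
    intro v h
    rw [pvChain_succ K k (f + 1) v, pvChain_succ K k f v]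
    split_ifs with hv
    · rw [pvChain_succ, if_pos hv] at h
      simp only [List.length_cons] at h
      rw [ih (v + k) (by omega)]
    · rfl

lemma chain_stable (K : List Int) (k : Int) (hk : k ≠ 0) (hK : K.Nodup) (v : Int) (hv : v ∈ K) :
    pvChain K k K.length (v + k) = pvChain K k (K.length + 1) (v + k) := by
  rcases Nat.eq_zero_or_pos K.length with h0 | hpos
  · have : K = [] := List.length_eq_zero_iff.1 h0
    subst this; simp at hv
  have hsub : pvChain K k K.length (v + k) ⊆ K.erase v := by
    intro u hu
    have h1 : u ∈ K := chain_subset K k _ _ hu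
    have h2 : u ≠ v := by
      intro he; subst he
      exact chain_not_mem K k hk _ u hu
    exact (List.mem_erase_of_ne h2).2 h1
  have hlen : (pvChain K k K.length (v + k)).length ≤ K.length - 1 := by
    have := nodup_subset_length (chain_nodup K k hk _ _) hsub
    rwa [List.length_erase_of_mem hv] at this
  exact (chain_succ_eq_of_lt K k K.length (v + k) (by omega)).symm

lemma chain_unfold (K : List Int) (k : Int) (hk : k ≠ 0) (hK : K.Nodup) (v : Int) :
    pvChain K k (K.length + 1) v =
      if v ∈ K then v :: pvChain K k (K.length + 1) (v + k) else [] := by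
  rw [pvChain_succ]
  split_ifs with hv
  · rw [chain_stable K k hk hK v hv]
  · rfl

def pvDlt (k a b : Int) : Prop := if 0 < k then a < b else b < a

lemma pvDlt_trans {k a b c : Int} (h1 : pvDlt k a b) (h2 : pvDlt k b c) : pvDlt k a c := by
  unfold pvDlt at *; split_ifs at * <;> omega

lemma pvDlt_asymm {k a b : Int} (h1 : pvDlt k a b) (h2 : pvDlt k b a) : False := by
  unfold pvDlt at *; split_ifs at * <;> omega

lemma pvDlt_irrefl {k a : Int} (h : pvDlt k a a) : False := by
  unfold pvDlt at h; split_ifs at h <;> omega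

lemma pvDlt_step {k a : Int} (hk : k ≠ 0) : pvDlt k a (a + k) := by
  unfold pvDlt; split_ifs with h <;> omega

lemma pvmod_sub_dvd (a b k : Int) (h : PySem.Int.mod a k = PySem.Int.mod b k) : k ∣ (a - b) := by
  have ha := PySem.Int.floordiv_mul_add_mod a k
  have hb := PySem.Int.floordiv_mul_add_mod b k
  exact ⟨PySem.Int.floordiv a k - PySem.Int.floordiv b k, by linarith [ha, hb]⟩

lemma pvmod_eq_of_dvd (a b k : Int) (hk : k ≠ 0) (h : k ∣ (a - b)) :
    PySem.Int.mod a k = PySem.Int.mod b k := by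
  obtain ⟨c, hc⟩ := h
  have ha := PySem.Int.floordiv_mul_add_mod a k
  have hb := PySem.Int.floordiv_mul_add_mod b k
  have hd : PySem.Int.mod a k - PySem.Int.mod b k =
      k * (c - PySem.Int.floordiv a k + PySem.Int.floordiv b k) := by ring_nf; nlinarith [ha, hb, hc]
  rcases lt_or_gt_of_ne hk with hneg | hpos
  · have b1 := PySem.Int.mod_neg_bounds a hneg
    have b2 := PySem.Int.mod_neg_bounds b hneg
    have hdvd : (-k) ∣ (PySem.Int.mod a k - PySem.Int.mod b k) :=
      ⟨-(c - PySem.Int.floordiv a k + PySem.Int.floordiv b k), by linarith [hd]⟩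
    have := Int.eq_zero_of_abs_lt_dvd hdvd (by rw [abs_lt]; omega)
    omega
  · have b1 := PySem.Int.mod_nonneg a hpos
    have b2 := PySem.Int.mod_lt a hpos
    have b3 := PySem.Int.mod_nonneg b hpos
    have b4 := PySem.Int.mod_lt b hpos
    have := Int.eq_zero_of_abs_lt_dvd ⟨_, hd⟩ (by rw [abs_lt]; omega)
    omega

lemma pvmod_add_k (p k : Int) (hk : k ≠ 0) : PySem.Int.mod (p + k) k = PySem.Int.mod p k :=
  pvmod_eq_of_dvd _ _ _ hk ⟨1, by ring⟩

lemma pvmod_sub_k (p k : Int) (hk : k ≠ 0) : PySem.Int.mod (p - k) k = PySem.Int.mod p k :=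
  pvmod_eq_of_dvd _ _ _ hk ⟨-1, by ring⟩

lemma pv_step_decomp {k p u : Int} (hk : k ≠ 0)
    (hm : PySem.Int.mod u k = PySem.Int.mod p k) (hd : pvDlt k p u) :
    ∃ m : Int, 1 ≤ m ∧ u = p + m * k := by
  obtain ⟨m, hmm⟩ := pvmod_sub_dvd u p k hm
  have hup : u = p + m * k := by linarith [hmm]
  refine ⟨m, ?_, hup⟩
  unfold pvDlt at hd
  split_ifs at hd with hpos
  · nlinarith
  · have hneg : k < 0 := by omega
    nlinarith

lemma pvDlt_of_mul {k : Int} (hk : k ≠ 0) {m : Int} (hm : 1 ≤ m) (p : Int) :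
    pvDlt k p (p + m * k) := by
  unfold pvDlt
  split_ifs with hpos
  · nlinarith
  · have : k < 0 := by omega
    nlinarith

lemma walk_eq (cnt : PySem.Dict Int Int) (K : List Int) (k : Int)
    (hc : ∀ u, cnt.contains u = true ↔ u ∈ K) :
    ∀ (fuel : Nat) (v : Int) (lst : List Int),
      pvWalkA cnt k fuel v lst = lst ++ (pvChain K k fuel v).map (fun u => cnt.getD u 0) := by
  intro fuel
  induction fuel with
  | zero => intro v lst; simp [pvWalkA, pvChain]
  | succ f ih =>
    intro v lst
    rw [pvWalkA, pvChain_succ]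
    by_cases hv : v ∈ K
    · rw [if_pos ((hc v).2 hv), ih, if_pos hv]
      simp
    · rw [if_neg (fun hh => hv ((hc v).1 hh)), if_neg hv]
      simp

def pvWB (cnt : PySem.Dict Int Int) (v : Int) : Int := (2 : Int) ^ (cnt.getD v 0).toNat - 1

def pvCW (cnt : PySem.Dict Int Int) (K : List Int) (k : Int) : Option Int → List Int
  | none => []
  | some p => (pvChain K k (K.length + 1) (p + k)).map (pvWB cnt)

def pvG (cnt : PySem.Dict Int Int) (K : List Int) (k : Int) (v : Int) : Int :=
  pvD ((pvChain K k (K.length + 1) v).map (pvWB cnt))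

def pvPRD (cnt : PySem.Dict Int Int) (K : List Int) (k : Int) (L : List Int) : Int :=
  ((L.filter (fun v => decide ((v - k) ∉ K))).map (pvG cnt K k)).prod

lemma pvT_nil (t s : Int) : pvT t s [] = t + s := by simp [pvT]

lemma pvT_cons (t s w : Int) (ws : List Int) : pvT t s (w :: ws) = pvT (s * w) (t + s) ws := by
  simp [pvT, pvDStep]

lemma big (cnt : PySem.Dict Int Int) (K : List Int) (k r : Int) (hk : k ≠ 0) (hK : K.Nodup) :
    ∀ (L : List Int) (a t s : Int) (prev : Option Int),
    (∀ u ∈ L, u ∈ K ∧ PySem.Int.mod u k = r) →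
    L.Pairwise (pvDlt k) →
    (match prev with
     | none => t = 0 ∧ s = 1 ∧ ∀ u ∈ K, PySem.Int.mod u k = r → u ∈ L
     | some p => p ∈ K ∧ PySem.Int.mod p k = r ∧ (∀ u ∈ L, pvDlt k p u) ∧
         (∀ u ∈ K, PySem.Int.mod u k = r → pvDlt k p u → u ∈ L)) →
    ((L.foldl (pvStep cnt k) (a, t, s, prev)).1 *
      ((L.foldl (pvStep cnt k) (a, t, s, prev)).2.1 + (L.foldl (pvStep cnt k) (a, t, s, prev)).2.2.1))
      = a * pvT t s (pvCW cnt K k prev) * pvPRD cnt K k L := by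
  intro L
  induction L with
  | nil =>
    intro a t s prev hmem hpair hprev
    simp only [List.foldl_nil]
    match prev with
    | none =>
      obtain ⟨ht, hs, _⟩ := hprev
      subst ht; subst hs
      simp [pvCW, pvPRD, pvT, pvDStep]
    | some p =>
      obtain ⟨hpK, hpr, _, hcl⟩ := hprev
      have hpk : p + k ∉ K := by
        intro hin
        have := hcl (p + k) hin (by rw [pvmod_add_k _ _ hk]; exact hpr) (pvDlt_step hk)
        simp at this
      have hcw : pvCW cnt K k (some p) = [] := by
        simp only [pvCW]
        rw [chain_unfold K k hk hK, if_neg hpk]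
        rfl
      rw [hcw]
      simp [pvPRD, pvT, pvDStep]
  | cons u L' ih =>
    intro a t s prev hmem hpair hprev
    obtain ⟨huK, hur⟩ := hmem u (List.mem_cons_self)
    have hmem' : ∀ x ∈ L', x ∈ K ∧ PySem.Int.mod x k = r := fun x hx => hmem x (List.mem_cons_of_mem _ hx)
    have hpair' : L'.Pairwise (pvDlt k) := hpair.of_cons
    have hhead : ∀ x ∈ L', pvDlt k u x := (List.pairwise_cons.1 hpair).1
    have hcl'' : (∀ x ∈ K, PySem.Int.mod x k = r → x ∈ u :: L') →
        ∀ x ∈ K, PySem.Int.mod x k = r → pvDlt k u x → x ∈ L' := by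
      intro hall x hxK hxr hux
      rcases List.mem_cons.1 (hall x hxK hxr) with h | h
      · exact absurd (h ▸ hux) (fun hh => pvDlt_irrefl hh)
      · exact h
    have hGhead : u - k ∉ K → pvT (pvWB cnt u) 1 (pvCW cnt K k (some u)) * pvPRD cnt K k L' = pvPRD cnt K k (u :: L') := by
      intro hstart
      have hch : pvChain K k (K.length + 1) u = u :: pvChain K k (K.length + 1) (u + k) := by
        rw [chain_unfold K k hk hK, if_pos huK]
      have hg : pvT (pvWB cnt u) 1 (pvCW cnt K k (some u)) = pvG cnt K k u := by
        simp only [pvG, hch, List.map_cons]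
        rw [show pvD (pvWB cnt u :: (pvChain K k (K.length + 1) (u + k)).map (pvWB cnt))
              = pvT (1 * pvWB cnt u) (0 + 1) ((pvChain K k (K.length + 1) (u + k)).map (pvWB cnt)) from pvT_cons 0 1 _ _]
        simp [pvCW]
      rw [hg]
      simp only [pvPRD, List.filter_cons]
      rw [if_pos (by simpa using hstart)]
      simp
    rw [List.foldl_cons]
    rcases prev with _ | p
    · -- prev = none : chain-start branch
      obtain ⟨ht, hs, hall⟩ := hprev
      subst ht; subst hs
      have hstep : pvStep cnt k (a, 0, 1, none) u = (a * (0 + 1), pvWB cnt u, 1, some u) := by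
        simp [pvStep, pvWB]
      rw [hstep]
      have hstart : u - k ∉ K := by
        intro hin
        have hres : PySem.Int.mod (u - k) k = r := by rw [pvmod_sub_k _ _ hk]; exact hur
        have hdu : pvDlt k (u - k) u := by
          have := pvDlt_step (a := u - k) hk
          rwa [show u - k + k = u by ring] at this
        rcases List.mem_cons.1 (hall _ hin hres) with h | h
        · exact hk (by omega)
        · exact pvDlt_asymm (hhead _ h) hdu
      rw [ih (a * (0 + 1)) (pvWB cnt u) 1 (some u) hmem' hpair' ⟨huK, hur, hhead, hcl'' hall⟩]
      rw [show pvCW cnt K k none = [] from rfl, pvT_nil]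
      rw [← hGhead hstart]
      ring
    · -- prev = some p
      obtain ⟨hpK, hpr, hord, hcl⟩ := hprev
      by_cases hcond : u - p = k
      · -- continuation branch
        have hup : u = p + k := by omega
        have hstep : pvStep cnt k (a, t, s, some p) u = (a, s * pvWB cnt u, t + s, some u) := by
          simp [pvStep, pvWB, hcond]
        rw [hstep]
        have hcl' : ∀ x ∈ K, PySem.Int.mod x k = r → pvDlt k u x → x ∈ L' := by
          intro x hxK hxr hux
          have hpx : pvDlt k p x := pvDlt_trans (hord u List.mem_cons_self) hux
          rcases List.mem_cons.1 (hcl x hxK hxr hpx) with h | h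
          · exact absurd (h ▸ hux) (fun hh => pvDlt_irrefl hh)
          · exact h
        rw [ih a (s * pvWB cnt u) (t + s) (some u) hmem' hpair' ⟨huK, hur, hhead, hcl'⟩]
        have hcw : pvCW cnt K k (some p) = pvWB cnt u :: pvCW cnt K k (some u) := by
          simp only [pvCW]
          rw [← hup, chain_unfold K k hk hK, if_pos (hup ▸ huK)]
          simp [hup]
        rw [hcw, pvT_cons]
        have hprd : pvPRD cnt K k (u :: L') = pvPRD cnt K k L' := by
          simp only [pvPRD, List.filter_cons]
          rw [if_neg (by simp [hup, hpK])]
        rw [hprd]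
      · -- chain-start branch after a finished chain
        have hupk : u ≠ p + k := fun hh => hcond (by omega)
        obtain ⟨m, hm1, hmeq⟩ := pv_step_decomp hk (hur.trans hpr.symm) (hord u List.mem_cons_self)
        have hm2 : 2 ≤ m := by
          rcases eq_or_lt_of_le hm1 with hh | hh
          · exact absurd (by rw [hmeq, ← hh]; ring) hupk
          · omega
        have hstep : pvStep cnt k (a, t, s, some p) u = (a * (t + s), pvWB cnt u, 1, some u) := by
          simp [pvStep, pvWB, hcond]
        rw [hstep]
        have hpk : p + k ∉ K := by
          intro hin
          have hmemL : p + k ∈ u :: L' := hcl (p + k) hin (by rw [pvmod_add_k _ _ hk]; exact hpr) (pvDlt_step hk)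
          rcases List.mem_cons.1 hmemL with h | h
          · exact hupk h.symm
          · have h1 : pvDlt k u (p + k) := hhead _ h
            have h2 : pvDlt k (p + k) u := by
              have := pvDlt_of_mul hk (by omega : 1 ≤ m - 1) (p + k)
              rwa [show p + k + (m - 1) * k = p + m * k by ring, ← hmeq] at this
            exact pvDlt_asymm h1 h2
        have hcw0 : pvCW cnt K k (some p) = [] := by
          simp only [pvCW]
          rw [chain_unfold K k hk hK, if_neg hpk]
          rfl
        have hstart : u - k ∉ K := by
          intro hin
          have hres : PySem.Int.mod (u - k) k = r := by rw [pvmod_sub_k _ _ hk]; exact hur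
          have hdu : pvDlt k (u - k) u := by
            have := pvDlt_step (a := u - k) hk
            rwa [show u - k + k = u by ring] at this
          have hmemL : u - k ∈ u :: L' := by
            apply hcl _ hin hres
            have := pvDlt_of_mul hk (by omega : 1 ≤ m - 1) p
            rwa [show p + (m - 1) * k = u - k by rw [hmeq]; ring] at this
          rcases List.mem_cons.1 hmemL with h | h
          · exact hk (by omega)
          · exact pvDlt_asymm (hhead _ h) hdu
        have hcl' : ∀ x ∈ K, PySem.Int.mod x k = r → pvDlt k u x → x ∈ L' := by
          intro x hxK hxr hux
          rcases List.mem_cons.1 (hcl x hxK hxr (pvDlt_trans (hord u List.mem_cons_self) hux)) with h | h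
          · exact absurd (h ▸ hux) (fun hh => pvDlt_irrefl hh)
          · exact h
        rw [ih (a * (t + s)) (pvWB cnt u) 1 (some u) hmem' hpair' ⟨huK, hur, hhead, hcl'⟩]
        rw [hcw0, pvT_nil]
        rw [← hGhead hstart]
        ring

lemma power_lookup (n : Int) (h0 : 0 ≤ n) (h1 : n ≤ 20) :
    PySem.List.pyGetD pvPower n 0 = 2 ^ n.toNat := by
  interval_cases n <;> decide

lemma foldl_mul (g : Int → Int) : ∀ (l : List Int) (a : Int),
    l.foldl (fun acc v => acc * g v) a = a * (l.map g).prod := by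
  intro l
  induction l with
  | nil => intro a; simp
  | cons x l ih => intro a; simp [ih, mul_assoc]

lemma prod_ite_insert (x : Int) (h : Int → Int) :
    ∀ (rs : List Int) (c : Int), rs.Nodup → c ∈ rs →
    (rs.map (fun r => if r = c then x * h r else h r)).prod = x * (rs.map h).prod := by
  intro rs
  induction rs with
  | nil => intro c _ hc; simp at hc
  | cons r rs' ih =>
    intro c hnd hc
    rw [List.map_cons, List.map_cons, List.prod_cons, List.prod_cons]
    by_cases hrc : r = c
    · rw [if_pos hrc]
      have hcn : ∀ r' ∈ rs', r' ≠ c := fun r' hmem he =>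
        (List.pairwise_cons.1 hnd).1 r' hmem (hrc.trans he.symm)
      have hmap : rs'.map (fun r => if r = c then x * h r else h r) = rs'.map h := by
        apply List.map_congr_left
        intro r' hmem
        rw [if_neg (hcn r' hmem)]
      rw [hmap]
      ring
    · rw [if_neg hrc]
      have hc' : c ∈ rs' := by
        rcases List.mem_cons.1 hc with h | h
        · exact absurd h.symm hrc
        · exact h
      rw [ih c (List.pairwise_cons.1 hnd).2 hc']
      ring

lemma part (g f : Int → Int) : ∀ (M : List Int) (rs : List Int), rs.Nodup → (∀ v ∈ M, f v ∈ rs) →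
    (rs.map (fun r => ((M.filter (fun v => f v == r)).map g).prod)).prod = (M.map g).prod := by
  intro M
  induction M with
  | nil =>
    intro rs _ _
    simp
  | cons v M' ih =>
    intro rs hnd hmem
    have hstep : rs.map (fun r => (((v :: M').filter (fun w => f w == r)).map g).prod)
        = rs.map (fun r => if r = f v then g v * ((M'.filter (fun w => f w == r)).map g).prod
            else ((M'.filter (fun w => f w == r)).map g).prod) := by
      apply List.map_congr_left
      intro r _
      rw [List.filter_cons]
      by_cases hfv : f v = r
      · rw [if_pos (by simp [hfv]), if_pos hfv.symm]
        simp
      · rw [if_neg (by simp [hfv]), if_neg (fun hh => hfv hh.symm)]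
    rw [hstep, prod_ite_insert (g v) _ rs (f v) hnd (hmem v List.mem_cons_self)]
    rw [ih rs hnd (fun w hw => hmem w (List.mem_cons_of_mem _ hw))]
    simp

lemma contains_iff (nums : List Int) (u : Int) :
    (PySem.Dict.counter nums).contains u = true ↔ u ∈ PySem.Set.ofList nums := by
  rw [PySem.Dict.contains_counter, List.contains_iff_mem, PySem.Set.mem_ofList]

lemma a_side (nums : List Int) (k : Int) (hk : k ≠ 0)
    (h20 : ∀ v ∈ nums, nums.count v ≤ 20) :
    lc_2597 nums k =
      pvPRD (PySem.Dict.counter nums) (PySem.Set.ofList nums) k (PySem.Set.ofList nums) - 1 := by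
  simp only [lc_2597]
  rw [PySem.Dict.keys_counter]
  set cnt := PySem.Dict.counter nums with hcnt
  set K := PySem.Set.ofList nums with hKdef
  have hK : K.Nodup := PySem.Set.nodup_ofList nums
  rw [PySem.List.foldl_ite_eq_foldl_filter
    (p := fun num => cnt.contains (num - k) = false)
    (f := fun ans num => ans * pvCheck (pvWalkA cnt k (K.length + 1) num []))]
  have hfil : K.filter (fun num => decide (cnt.contains (num - k) = false))
      = K.filter (fun v => decide ((v - k) ∉ K)) := by
    apply List.filter_congr
    intro v _
    apply decide_eq_decide.2
    rw [← contains_iff nums (v - k)]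
    constructor
    · intro h1 h2; rw [h1] at h2; exact Bool.false_ne_true h2
    · intro h1
      cases hc : cnt.contains (v - k)
      · rfl
      · exact absurd hc h1
  rw [hfil, foldl_mul]
  have hmap : (K.filter (fun v => decide ((v - k) ∉ K))).map
        (fun num => pvCheck (pvWalkA cnt k (K.length + 1) num []))
      = (K.filter (fun v => decide ((v - k) ∉ K))).map (pvG cnt K k) := by
    apply List.map_congr_left
    intro v hv
    have hvK : v ∈ K := List.mem_of_mem_filter hv
    rw [walk_eq cnt K k (contains_iff nums) (K.length + 1) v []]
    rw [List.nil_append]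
    have hch : pvChain K k (K.length + 1) v = v :: pvChain K k (K.length + 1) (v + k) :=
      by rw [chain_unfold K k hk hK, if_pos hvK]
    have hne : (pvChain K k (K.length + 1) v).map (fun u => cnt.getD u 0) ≠ [] := by
      rw [hch]; simp
    rw [check_eq _ hne]
    rw [List.map_map]
    have hw : (pvChain K k (K.length + 1) v).map (pvWf ∘ fun u => cnt.getD u 0)
        = (pvChain K k (K.length + 1) v).map (pvWB cnt) := by
      apply List.map_congr_left
      intro u hu
      have huK : u ∈ K := chain_subset K k _ _ hu
      have humem : u ∈ nums := (PySem.Set.mem_ofList nums u).1 huK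
      have hcount : 1 ≤ nums.count u := List.count_pos_iff.2 humem
      have hc20 : nums.count u ≤ 20 := h20 u humem
      simp only [Function.comp, pvWf, pvWB]
      rw [PySem.Dict.getD_counter]
      rw [power_lookup _ (by exact_mod_cast Nat.zero_le _) (by exact_mod_cast hc20)]
    rw [hw]
    rfl
  rw [hmap, one_mul]
  rfl

lemma buckets_values (K : List Int) (k : Int) :
    (K.foldl (fun d v => d.modify (PySem.Int.mod v k) [] (· ++ [v]))
        (PySem.Dict.empty : PySem.Dict Int (List Int))).values
      = (PySem.Set.ofList (K.map (fun v => PySem.Int.mod v k))).map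
          (fun r => K.filter (fun v => PySem.Int.mod v k == r)) := by
  set D := K.foldl (fun d v => d.modify (PySem.Int.mod v k) [] (· ++ [v]))
    (PySem.Dict.empty : PySem.Dict Int (List Int)) with hD
  have hkeys : D.keys = PySem.Set.ofList (K.map (fun v => PySem.Int.mod v k)) := by
    rw [hD, PySem.Dict.keys_foldl_modify_key]
    rw [PySem.Set.ofList_eq_foldl]
    rfl
  have hnd : D.keys.Nodup := by
    rw [hD]
    exact PySem.Dict.nodup_keys_foldl_modify_key K (fun v => PySem.Int.mod v k) _ _ _ List.nodup_nil
  rw [PySem.Dict.values_eq_map_keys D hnd [], hkeys]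
  apply List.map_congr_left
  intro r _
  have hpair : D = (K.map (fun v => (PySem.Int.mod v k, v))).foldl
      (fun d p => d.modify p.1 [] (· ++ [p.2])) (PySem.Dict.empty : PySem.Dict Int (List Int)) := by
    rw [List.foldl_map]
  rw [hpair, PySem.Dict.getD_foldl_modify_append]
  have hemp : (PySem.Dict.empty : PySem.Dict Int (List Int)).getD r [] = [] := rfl
  rw [hemp, List.nil_append]
  rw [List.filter_map, List.map_map]
  have h1 : ((fun p : Int × Int => p.2) ∘ fun v => (PySem.Int.mod v k, v)) = fun v : Int => v := rfl
  have h2 : ((fun p : Int × Int => p.1 == r) ∘ fun v => (PySem.Int.mod v k, v))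
      = fun v : Int => PySem.Int.mod v k == r := rfl
  rw [h1, h2]
  exact List.map_id _

lemma pvPRD_perm (cnt : PySem.Dict Int Int) (K : List Int) (k : Int) {l1 l2 : List Int}
    (h : l1.Perm l2) : pvPRD cnt K k l1 = pvPRD cnt K k l2 := by
  exact List.Perm.prod_eq (List.Perm.map _ (List.Perm.filter _ h))

lemma inner_fold (nums : List Int) (k : Int) (hk : k ≠ 0) (r : Int) (a : Int) :
    (let vals := PySem.List.sorted ((PySem.Set.ofList nums).filter (fun v => PySem.Int.mod v k == r)) (fun x => x) (decide (k < 0))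
     let s := vals.foldl (pvStep (PySem.Dict.counter nums) k) (a, 0, 1, none)
     s.1 * (s.2.1 + s.2.2.1))
    = a * pvPRD (PySem.Dict.counter nums) (PySem.Set.ofList nums) k
        ((PySem.Set.ofList nums).filter (fun v => PySem.Int.mod v k == r)) := by
  set cnt := PySem.Dict.counter nums with hcnt
  set K := PySem.Set.ofList nums with hKdef
  have hK : K.Nodup := PySem.Set.nodup_ofList nums
  set flt := K.filter (fun v => PySem.Int.mod v k == r) with hflt
  set vals := PySem.List.sorted flt (fun x => x) (decide (k < 0)) with hvals
  have hperm : vals.Perm flt := PySem.List.sorted_perm _ _ _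
  have hnd : vals.Nodup := (List.Perm.nodup_iff hperm).2 (List.Nodup.filter _ hK)
  have hmem : ∀ u ∈ vals, u ∈ K ∧ PySem.Int.mod u k = r := by
    intro u hu
    have := hperm.mem_iff.1 hu
    rw [hflt, List.mem_filter] at this
    exact ⟨this.1, by simpa using this.2⟩
  have hpair : vals.Pairwise (pvDlt k) := by
    rcases lt_or_gt_of_ne hk with hneg | hpos
    · have hrev : (decide (k < 0)) = true := decide_eq_true hneg
      rw [hvals, hrev]
      have hsorted := PySem.List.sorted_pairwise_rev flt (fun x : Int => x)
      have := hsorted.and ((List.Perm.nodup_iff (PySem.List.sorted_perm flt (fun x : Int => x) true)).2 (List.Nodup.filter _ hK))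
      apply this.imp
      intro x y hxy
      unfold pvDlt
      rw [if_neg (by omega)]
      rcases hxy with ⟨hle, hne⟩
      omega
    · have hrev : (decide (k < 0)) = false := decide_eq_false (by omega)
      rw [hvals, hrev]
      have hsorted := PySem.List.sorted_pairwise flt (fun x : Int => x)
      have := hsorted.and ((List.Perm.nodup_iff (PySem.List.sorted_perm flt (fun x : Int => x) false)).2 (List.Nodup.filter _ hK))
      apply this.imp
      intro x y hxy
      unfold pvDlt
      rw [if_pos hpos]
      rcases hxy with ⟨hle, hne⟩
      omega
  have hall : ∀ u ∈ K, PySem.Int.mod u k = r → u ∈ vals := by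
    intro u huK hur
    rw [hvals, PySem.List.mem_sorted, hflt, List.mem_filter]
    exact ⟨huK, by simpa using hur⟩
  have hbig := big cnt K k r hk hK vals a 0 1 none hmem hpair ⟨rfl, rfl, hall⟩
  simp only []
  rw [hbig]
  rw [show pvCW cnt K k none = [] from rfl, pvT_nil]
  rw [pvPRD_perm cnt K k hperm]
  ring

lemma b_side (nums : List Int) (k : Int) (hk : k ≠ 0) :
    lc_2597_alt nums k =
      pvPRD (PySem.Dict.counter nums) (PySem.Set.ofList nums) k (PySem.Set.ofList nums) - 1 := by
  simp only [lc_2597_alt]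
  rw [if_neg (by simp [hk])]
  rw [PySem.Dict.keys_counter, buckets_values]
  set cnt := PySem.Dict.counter nums with hcnt
  set K := PySem.Set.ofList nums with hKdef
  have hK : K.Nodup := PySem.Set.nodup_ofList nums
  set residues := PySem.Set.ofList (K.map (fun v => PySem.Int.mod v k)) with hres
  rw [List.foldl_map]
  have hcongr := PySem.List.foldl_congr_mem residues
    (fun ans r =>
      let srt := PySem.List.sorted (K.filter (fun v => PySem.Int.mod v k == r)) (fun x => x) (decide (k < 0))
      let s := srt.foldl (pvStep cnt k) (ans, 0, 1, none)
      s.1 * (s.2.1 + s.2.2.1))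
    (fun ans r => ans * pvPRD cnt K k (K.filter (fun v => PySem.Int.mod v k == r)))
    1
    (fun acc x _ => inner_fold nums k hk x acc)
  rw [hcongr, foldl_mul, one_mul]
  have hmapQ : residues.map (fun r => pvPRD cnt K k (K.filter (fun v => PySem.Int.mod v k == r)))
      = residues.map (fun r =>
          (((K.filter (fun v => decide ((v - k) ∉ K))).filter (fun v => PySem.Int.mod v k == r)).map (pvG cnt K k)).prod) := by
    apply List.map_congr_left
    intro r _
    simp only [pvPRD]
    rw [List.filter_comm]
  rw [hmapQ]
  rw [part (pvG cnt K k) (fun v => PySem.Int.mod v k) (K.filter (fun v => decide ((v - k) ∉ K))) residues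
    (PySem.Set.nodup_ofList _)
    (fun v hv => (PySem.Set.mem_ofList _ _).2 (List.mem_map.2 ⟨v, List.mem_of_mem_filter hv, rfl⟩))]
  rfl

lemma main_eq (nums : List Int) (k : Int)
    (hpre : k = 0 ∨ ∀ v ∈ nums, nums.count v ≤ 20) :
    lc_2597 nums k = lc_2597_alt nums k := by
  by_cases hk : k = 0
  · subst hk
    have hB : lc_2597_alt nums 0 = 0 := by simp [lc_2597_alt]
    rw [hB]
    simp only [lc_2597]
    rw [PySem.Dict.keys_counter]
    rw [PySem.List.foldl_congr_mem (PySem.Set.ofList nums) _ (fun acc x => acc) 1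
      (fun acc x hx => by
        rw [if_neg]
        rw [sub_zero]
        intro hfalse
        rw [(contains_iff nums x).2 hx] at hfalse
        simp at hfalse)]
    rw [PySem.List.foldl_ignore]
    norm_num
  · rcases hpre with h0 | h20
    · exact absurd h0 hk
    rw [a_side nums k hk h20, b_side nums k hk]

-- ===== VERDICT (by name: the statement is the Claim_ definition above) =====
theorem lc_2597_spec : Claim_equal_lc_2597 := by
  intro nums k _ hpre
  unfold Spec_lc_2597
  exact main_eq nums k hpre
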